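-- pv_equiv track=rewrite | github.com/DarkAigle/lab1 | 1.2.py | count_case_pairs
-- ===== SOURCE A (Python) =====
-- def count_case_pairs(word):
--     upper_pairs = 0
--     lower_pairs = 0
--     in_upper = False
--     in_lower = False
--
--     for char in word:
--         if char.isupper():
--             if not in_upper:
--                 upper_pairs += 1
--             in_upper = not in_upper
--         elif char.islower():
--             if not in_lower:
--                 lower_pairs += 1
--             in_lower = not in_lower
--
--     total_letters = sum(c.isalpha() for c in word)
--
--     return upper_pairs, lower_pairs, total_letters
-- ===== SOURCE B (Python) =====
-- def count_case_pairs(word):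
--     u = sum(1 for c in word if c.isupper())
--     l = sum(1 for c in word if c.islower())
--     a = sum(1 for c in word if c.isalpha())
--     return ((u + 1) // 2, (l + 1) // 2, a)
-- ===== Notes on version B (the rewrite author's own statement) =====
-- stated objective: simpler
-- what changed: Replaced A's two-boolean toggle state machine with three independent character counts and the closed form ceil(count/2) = (count+1)//2 for each pair tally.
import Mathlib
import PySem

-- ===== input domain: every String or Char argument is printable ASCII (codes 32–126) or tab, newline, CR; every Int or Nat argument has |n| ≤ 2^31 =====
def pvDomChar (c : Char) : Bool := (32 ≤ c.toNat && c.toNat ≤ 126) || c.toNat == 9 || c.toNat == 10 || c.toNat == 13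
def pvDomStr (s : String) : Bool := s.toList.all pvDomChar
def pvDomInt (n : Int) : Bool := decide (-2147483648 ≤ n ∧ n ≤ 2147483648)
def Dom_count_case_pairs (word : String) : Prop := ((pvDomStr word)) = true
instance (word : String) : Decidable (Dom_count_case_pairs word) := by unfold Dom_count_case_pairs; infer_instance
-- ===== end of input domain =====

-- B replaces A's toggle state machine with three counts and the closed form (count+1)//2 (simpler).

-- ===== PORT A =====
-- one loop step of A: state = (upper_pairs, lower_pairs, in_upper, in_lower)
def pvStepA (s : Int × Int × Bool × Bool) (c : Char) : Int × Int × Bool × Bool :=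
  let (up, lo, inU, inL) := s
  if PySem.Chars.isupper c then
    ((if !inU then up + 1 else up), lo, !inU, inL)
  else if PySem.Chars.islower c then
    (up, (if !inL then lo + 1 else lo), inU, !inL)
  else (up, lo, inU, inL)

def count_case_pairs (word : String) : Int × Int × Int :=
  let st := word.toList.foldl pvStepA (0, 0, false, false)
  let total_letters : Int :=
    word.toList.foldl (fun acc c => acc + (if PySem.Chars.isalpha c then 1 else 0)) 0
  (st.1, st.2.1, total_letters)

-- ===== PORT B =====
def count_case_pairs_alt (word : String) : Int × Int × Int :=
  let u : Int := ((word.toList.filter (fun c => PySem.Chars.isupper c)).length : Int)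
  let l : Int := ((word.toList.filter (fun c => PySem.Chars.islower c)).length : Int)
  let a : Int := ((word.toList.filter (fun c => PySem.Chars.isalpha c)).length : Int)
  (PySem.Int.floordiv (u + 1) 2, PySem.Int.floordiv (l + 1) 2, a)

-- ===== PRECONDITION & SPEC =====
def Spec_count_case_pairs (word : String) (out : Int × Int × Int) : Prop := out = count_case_pairs_alt word
instance (word : String) (out : Int × Int × Int) : Decidable (Spec_count_case_pairs word out) := by unfold Spec_count_case_pairs; infer_instance

-- ===== CLAIM (what is proved, stated in full; the proofs are below) =====
def Claim_equal_count_case_pairs : Prop := ∀ (word : String), Dom_count_case_pairs word → Spec_count_case_pairs word (count_case_pairs word)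

-- ===== LEMMAS AND PROOFS =====

-- increments contributed by n same-case letters when the toggle starts at flag x
def pvInc (n : Nat) (x : Bool) : Nat := (n + (if x then 0 else 1)) / 2

lemma pvParitySucc (n : Nat) : decide ((n + 1) % 2 = 1) = !decide (n % 2 = 1) := by
  rcases Nat.mod_two_eq_zero_or_one n with h | h <;> simp [Nat.add_mod, h]

lemma pvStepA_loop (l : List Char) (a b : Int) (x y : Bool) :
    l.foldl pvStepA (a, b, x, y) =
      (a + (pvInc (l.countP (fun c => PySem.Chars.isupper c)) x : Int),
       b + (pvInc (l.countP (fun c => PySem.Chars.islower c)) y : Int),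
       x ^^ decide ((l.countP (fun c => PySem.Chars.isupper c)) % 2 = 1),
       y ^^ decide ((l.countP (fun c => PySem.Chars.islower c)) % 2 = 1)) := by
  induction l generalizing a b x y with
  | nil => cases x <;> cases y <;> simp [pvInc]
  | cons c t ih =>
    simp only [List.foldl_cons, List.countP_cons, pvStepA]
    by_cases hu : PySem.Chars.isupper c
    · have hl : PySem.Chars.islower c = false := by
        revert hu
        simp [PySem.Chars.isupper, PySem.Chars.islower, Char.le_def, UInt32.le_iff_toNat_le]
        omega
      simp only [hu, hl, if_true, if_false, Bool.false_eq_true]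
      rw [ih]
      cases x <;>
      · simp only [Bool.not_false, Bool.not_true, ite_true, ite_false, Bool.false_eq_true,
          Prod.mk.injEq, pvParitySucc, pvInc, Bool.false_xor, Bool.true_xor, add_zero]
        and_intros <;> first
          | (push_cast; omega)
          | (cases hp : decide ((List.countP (fun c => PySem.Chars.isupper c) t) % 2 = 1) <;>
              simp)
          | rfl
    · by_cases hl : PySem.Chars.islower c
      · simp only [hu, hl, if_true, if_false, Bool.false_eq_true]
        rw [ih]
        cases y <;>
        · simp only [Bool.not_false, Bool.not_true, ite_true, ite_false, Bool.false_eq_true,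
            Prod.mk.injEq, pvParitySucc, pvInc, Bool.false_xor, Bool.true_xor, add_zero]
          and_intros <;> first
            | (push_cast; omega)
            | (cases hp : decide ((List.countP (fun c => PySem.Chars.islower c) t) % 2 = 1) <;>
                simp)
            | rfl
      · simp only [hu, hl, if_false, Bool.false_eq_true]
        rw [ih]
        simp [hu, hl]

lemma pvSumAlpha (l : List Char) (a : Int) :
    l.foldl (fun acc c => acc + (if PySem.Chars.isalpha c then 1 else 0)) a =
      a + ((l.filter (fun c => PySem.Chars.isalpha c)).length : Int) := by
  induction l generalizing a with
  | nil => simp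
  | cons c t ih =>
    by_cases h : PySem.Chars.isalpha c <;> simp [h, ih] <;> ring

lemma pvFloordiv_succ_two (n : Nat) :
    PySem.Int.floordiv ((n : Int) + 1) 2 = ((n + 1) / 2 : Nat) := by
  have := PySem.Int.floordiv_natCast (n + 1) 2
  push_cast at this ⊢
  omega

-- ===== VERDICT (by name: the statement is the Claim_ definition above) =====
theorem count_case_pairs_spec : Claim_equal_count_case_pairs := by
  intro word _
  simp only [Spec_count_case_pairs, count_case_pairs, count_case_pairs_alt]
  rw [pvStepA_loop, pvSumAlpha, pvFloordiv_succ_two, pvFloordiv_succ_two]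
  simp [pvInc, List.countP_eq_length_filter]
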